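-- pv_equiv track=rewrite | github.com/statgen/fipip | tutorials/borzoi_2.py | parse_track_indices
-- ===== SOURCE A (Python) =====
-- from typing import Iterable, List, Optional, Sequence, Tuple
--
-- def parse_track_indices(spec: str, n_tracks: int = 89) -> List[int]:
--     """
--     Parse a track index spec into 0-based indices.
--     Examples:
--       "1-89"
--       "1,5,7-10,23,80-89"
--     Tracks are 1-indexed in the spec; we convert to 0-index.
--     """
--     if not spec:
--         return list(range(n_tracks))
--     out = set()
--     for part in spec.split(","):
--         part = part.strip()
--         if not part:
--             continue
--         if "-" in part:
--             a, b = part.split("-", 1)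
--             a_i = int(a)
--             b_i = int(b)
--             if a_i < 1 or b_i > n_tracks or a_i > b_i:
--                 raise ValueError(f"Invalid track range: {part}")
--             out.update(range(a_i - 1, b_i))  # inclusive upper, converted to 0-based
--         else:
--             v = int(part)
--             if v < 1 or v > n_tracks:
--                 raise ValueError(f"Invalid track index: {v}")
--             out.add(v - 1)
--     return sorted(out)
-- ===== SOURCE B (Python) =====
-- from typing import List, Tuple
--
--
-- def _bounds(part: str, n_tracks: int) -> Tuple[int, int]:
--     """Parse one non-empty part into inclusive 1-based (lo, hi), validating it."""
--     part = part.strip()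
--     if "-" in part:
--         a, b = part.split("-", 1)
--         lo = int(a)
--         hi = int(b)
--         if lo < 1 or hi > n_tracks or lo > hi:
--             raise ValueError(f"Invalid track range: {part}")
--     else:
--         lo = hi = int(part)
--         if lo < 1 or lo > n_tracks:
--             raise ValueError(f"Invalid track index: {lo}")
--     return lo, hi
--
--
-- def parse_track_indices(spec: str, n_tracks: int = 89) -> List[int]:
--     """
--     Parse a track index spec into 0-based indices.
--     Bounds-merge variant: a comprehension turns each non-empty part into one
--     inclusive 1-based (lo, hi) bound, the bounds are sorted by lo and a single
--     sweep emits each covered index once in increasing order -- no set and no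
--     per-element dedup or sort of the indices.
--     """
--     if not spec:
--         return list(range(n_tracks))
--     bounds = [_bounds(p, n_tracks) for p in spec.split(",") if p.strip()]
--     bounds.sort(key=lambda lh: lh[0])
--     out = []
--     emitted = 0
--     for lo, hi in bounds:
--         start = max(lo - 1, emitted)
--         if hi > start:
--             out.extend(range(start, hi))
--             emitted = hi
--     return out
-- ===== Notes on version B (the rewrite author's own statement) =====
-- stated objective: alternative
-- what changed: Replaces the per-element set accumulator plus final sort of indices by a two-stage bounds pipeline: a comprehension turns each non-empty part into one inclusive 1-based (lo,hi) bound via a helper, the bounds are sorted by lo, and one watermark sweep emits each covered index once in increasing order, so no set and no per-element dedup or sort of the indices.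
import Mathlib
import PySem

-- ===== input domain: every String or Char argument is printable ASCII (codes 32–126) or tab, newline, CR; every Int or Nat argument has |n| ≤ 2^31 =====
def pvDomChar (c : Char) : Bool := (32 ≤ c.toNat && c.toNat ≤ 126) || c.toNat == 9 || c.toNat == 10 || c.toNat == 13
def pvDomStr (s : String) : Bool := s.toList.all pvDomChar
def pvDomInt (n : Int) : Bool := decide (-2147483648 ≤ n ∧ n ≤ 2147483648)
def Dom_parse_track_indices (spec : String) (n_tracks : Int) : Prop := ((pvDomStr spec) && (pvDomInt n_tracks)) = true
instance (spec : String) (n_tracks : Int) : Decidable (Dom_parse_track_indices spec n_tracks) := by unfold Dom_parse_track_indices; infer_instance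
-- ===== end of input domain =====

-- B replaces A's per-element set accumulator + final sort by a bounds pipeline: each non-empty
-- part becomes one inclusive 1-based (lo,hi) bound, the bounds are sorted by lo and one sweep
-- emits each covered index once in increasing order (alternative; A's raise points excluded by Pre_).

-- ===== PORT A =====
-- one loop iteration of A; the state is `none` once a ValueError has been raised
def ptiA_step (n_tracks : Int) (acc : Option (PySem.Set Int)) (part : List Char) :
    Option (PySem.Set Int) :=
  match acc with
  | none => none
  | some out =>
    let p := PySem.Chars.strip part
    if p = [] then some out
    else if PySem.Chars.isIn ['-'] p then
      match PySem.Chars.splitOnMax p ['-'] 1 with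
      | [a, b] =>
        match PySem.Int.ofChars? a, PySem.Int.ofChars? b with
        | some a_i, some b_i =>
            if a_i < 1 ∨ b_i > n_tracks ∨ a_i > b_i then none  -- raise ValueError
            else some (PySem.Set.update out (PySem.List.pyRange (a_i - 1) b_i))
        | _, _ => none  -- int() raises ValueError
      | _ => none  -- unreachable: split("-",1) with "-" present yields exactly two pieces
    else
      match PySem.Int.ofChars? p with
      | some v => if v < 1 ∨ v > n_tracks then none  -- raise ValueError
                  else some (PySem.Set.add out (v - 1))
      | none => none  -- int() raises ValueError

def parse_track_indices (spec : String) (n_tracks : Int) : List Int :=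
  if spec = "" then PySem.List.pyRange 0 n_tracks
  else
    match (PySem.Chars.splitOn spec.toList [',']).foldl (ptiA_step n_tracks)
        (some PySem.Set.empty) with
    | some out => PySem.List.sorted out (fun x => x)
    | none => []  -- A raises here; excluded by Pre_

-- ===== PORT B =====
-- _bounds: one non-empty part → inclusive 1-based (lo, hi); none = ValueError
def ptiB_bounds (part : List Char) (n_tracks : Int) : Option (Int × Int) :=
  let p := PySem.Chars.strip part
  if PySem.Chars.isIn ['-'] p then
    match PySem.Chars.splitOnMax p ['-'] 1 with
    | [a, b] =>
      match PySem.Int.ofChars? a, PySem.Int.ofChars? b with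
      | some lo, some hi =>
          if lo < 1 ∨ hi > n_tracks ∨ lo > hi then none else some (lo, hi)
      | _, _ => none
    | _ => none  -- unreachable: split("-",1) with "-" present yields exactly two pieces
  else
    match PySem.Int.ofChars? p with
    | some lo => if lo < 1 ∨ lo > n_tracks then none else some (lo, lo)
    | none => none

-- the list comprehension [_bounds(p, n) for p in parts if p.strip()] over the filtered parts
def ptiB_collect (n_tracks : Int) : List (List Char) → Option (List (Int × Int))
  | [] => some []
  | p :: ps =>
    match ptiB_bounds p n_tracks with
    | none => none
    | some lh =>
      match ptiB_collect n_tracks ps with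
      | none => none
      | some rest => some (lh :: rest)

-- the body of B's sweep loop over the sorted bounds: state = (out, emitted)
def ptiB_sweep (st : List Int × Int) (lh : Int × Int) : List Int × Int :=
  let start := if lh.1 - 1 > st.2 then lh.1 - 1 else st.2  -- max(lo - 1, emitted)
  if lh.2 > start then (st.1 ++ PySem.List.pyRange start lh.2, lh.2) else st

def parse_track_indices_alt (spec : String) (n_tracks : Int) : List Int :=
  if spec = "" then PySem.List.pyRange 0 n_tracks
  else
    match ptiB_collect n_tracks
        ((PySem.Chars.splitOn spec.toList [',']).filter
          (fun p => !(PySem.Chars.strip p).isEmpty)) with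
    | some bounds =>
        ((PySem.List.sorted bounds (fun lh => lh.1)).foldl ptiB_sweep
          (([] : List Int), (0 : Int))).1
    | none => []  -- B raises here; excluded by Pre_

-- ===== PRECONDITION & SPEC =====
-- validity of one comma-separated part, exactly the checks both programs make before accepting it
def pvPartOK (n_tracks : Int) (part : List Char) : Bool :=
  let p := PySem.Chars.strip part
  if p = [] then true
  else if PySem.Chars.isIn ['-'] p then
    match PySem.Chars.splitOnMax p ['-'] 1 with
    | [a, b] =>
      match PySem.Int.ofChars? a, PySem.Int.ofChars? b with
      | some a_i, some b_i => decide (1 ≤ a_i ∧ b_i ≤ n_tracks ∧ a_i ≤ b_i)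
      | _, _ => false
    | _ => false
  else
    match PySem.Int.ofChars? p with
    | some v => decide (1 ≤ v ∧ v ≤ n_tracks)
    | none => false

-- Pre_ excludes exactly the inputs where A raises ValueError (a part that is not a valid
-- integer / range, or out of the 1..n_tracks bounds); B raises there too.
def Pre_parse_track_indices (spec : String) (n_tracks : Int) : Prop :=
  spec = "" ∨ ∀ part ∈ PySem.Chars.splitOn spec.toList [','], pvPartOK n_tracks part = true
instance (spec : String) (n_tracks : Int) : Decidable (Pre_parse_track_indices spec n_tracks) := by
  unfold Pre_parse_track_indices; infer_instance

def pvWitness_parse_track_indices : String × Int := ("1,5,7-10", 89)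

def Spec_parse_track_indices (spec : String) (n_tracks : Int) (out : List Int) : Prop :=
  out = parse_track_indices_alt spec n_tracks
instance (spec : String) (n_tracks : Int) (out : List Int) :
    Decidable (Spec_parse_track_indices spec n_tracks out) := by
  unfold Spec_parse_track_indices; infer_instance

-- ===== CLAIM (what is proved, stated in full; the proofs are below) =====
def Claim_equal_parse_track_indices : Prop := ∀ (spec : String) (n_tracks : Int), Dom_parse_track_indices spec n_tracks → Pre_parse_track_indices spec n_tracks → Spec_parse_track_indices spec n_tracks (parse_track_indices spec n_tracks)

-- ===== LEMMAS AND PROOFS =====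

lemma pv_pyRange_pairwise (a b : Int) : (PySem.List.pyRange a b).Pairwise (· < ·) := by
  rw [PySem.List.pyRange_of_pos a b Int.one_pos]
  exact List.Pairwise.map _ (fun x y h => by omega) List.pairwise_lt_range

-- the invariant tying A's set to B's bounds list
def pvRel (out : PySem.Set Int) (bs : List (Int × Int)) (n_tracks : Int) : Prop :=
  out.Nodup ∧
  (∀ x : Int, x ∈ out ↔ ∃ lh ∈ bs, lh.1 ≤ x + 1 ∧ x + 1 ≤ lh.2) ∧
  (∀ lh ∈ bs, 1 ≤ lh.1 ∧ lh.1 ≤ lh.2 ∧ lh.2 ≤ n_tracks)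

-- simultaneous run: A's foldl over all parts, B's collect over the nonempty-strip parts
lemma pv_run (n_tracks : Int) (parts : List (List Char))
    (hok : ∀ part ∈ parts, pvPartOK n_tracks part = true)
    (out : PySem.Set Int) (bs : List (Int × Int))
    (hnd : out.Nodup)
    (hmem : ∀ x : Int, x ∈ out ↔ ∃ lh ∈ bs, lh.1 ≤ x + 1 ∧ x + 1 ≤ lh.2)
    (hbd : ∀ lh ∈ bs, 1 ≤ lh.1 ∧ lh.1 ≤ lh.2 ∧ lh.2 ≤ n_tracks) :
    ∃ out' bs',
      parts.foldl (ptiA_step n_tracks) (some out) = some out' ∧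
      ptiB_collect n_tracks
        (parts.filter (fun p => !(PySem.Chars.strip p).isEmpty)) = some bs' ∧
      pvRel out' (bs ++ bs') n_tracks := by
  induction parts generalizing out bs with
  | nil =>
    exact ⟨out, [], rfl, rfl, hnd, by simpa using hmem, by simpa using hbd⟩
  | cons part rest ih =>
    have hok1 := hok part (List.mem_cons_self ..)
    have hokr := fun q hq => hok q (List.mem_cons_of_mem _ hq)
    unfold pvPartOK at hok1
    by_cases h1 : PySem.Chars.strip part = []
    · -- A's `continue`; B's comprehension filter drops the part
      have hA : ptiA_step n_tracks (some out) part = some out := by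
        unfold ptiA_step; simp [h1]
      have hfil : (!(PySem.Chars.strip part).isEmpty) = false := by
        simp [h1]
      obtain ⟨o', bs', hA', hB', hrel⟩ := ih hokr out bs hnd hmem hbd
      exact ⟨o', bs', by simpa [List.foldl_cons, hA] using hA',
        by simpa [List.filter_cons, hfil] using hB', hrel⟩
    · rw [if_neg h1] at hok1
      have hfil : (!(PySem.Chars.strip part).isEmpty) = true := by
        simp [h1]
      -- common continuation once one part yields set-delta `out2` and bound `lh`
      by_cases h2 : PySem.Chars.isIn ['-'] (PySem.Chars.strip part) = true
      · simp only [h2, if_true] at hok1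
        rcases hsp : PySem.Chars.splitOnMax (PySem.Chars.strip part) ['-'] 1 with
          _ | ⟨a, _ | ⟨b, _ | ⟨c, tl⟩⟩⟩ <;> rw [hsp] at hok1
        · simp at hok1
        · simp at hok1
        · dsimp only [] at hok1
          rcases ha : PySem.Int.ofChars? a with _ | a_i <;> rw [ha] at hok1
          · simp at hok1
          rcases hb : PySem.Int.ofChars? b with _ | b_i <;> rw [hb] at hok1
          · simp at hok1
          simp only [decide_eq_true_eq] at hok1
          have hcond : ¬ (a_i < 1 ∨ b_i > n_tracks ∨ a_i > b_i) := by omega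
          have hA : ptiA_step n_tracks (some out) part =
              some (PySem.Set.update out (PySem.List.pyRange (a_i - 1) b_i)) := by
            unfold ptiA_step; simp [h1, h2, hsp, ha, hb, hcond]
          have hBb : ptiB_bounds part n_tracks = some (a_i, b_i) := by
            unfold ptiB_bounds; simp [h2, hsp, ha, hb, hcond]
          obtain ⟨o', bs', hA', hB', hrel⟩ := ih hokr
            (PySem.Set.update out (PySem.List.pyRange (a_i - 1) b_i)) (bs ++ [(a_i, b_i)])
            (PySem.Set.nodup_update out _ hnd)
            (by
              intro x
              rw [PySem.Set.mem_update, PySem.List.mem_pyRange_one, hmem x]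
              simp only [List.mem_append, List.mem_singleton]
              constructor
              · rintro (⟨lh, hlh, h⟩ | h)
                · exact ⟨lh, Or.inl hlh, h⟩
                · exact ⟨(a_i, b_i), Or.inr rfl, by omega⟩
              · rintro ⟨lh, hlh | rfl, h⟩
                · exact Or.inl ⟨lh, hlh, h⟩
                · exact Or.inr (by omega))
            (by
              intro lh hlh
              rcases List.mem_append.mp hlh with h | h
              · exact hbd lh h
              · rw [List.mem_singleton] at h; subst h; refine ⟨by omega, by omega, by omega⟩)
          refine ⟨o', (a_i, b_i) :: bs', by simpa [List.foldl_cons, hA] using hA', ?_, ?_⟩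
          · simp only [List.filter_cons, hfil, if_true, ptiB_collect, hBb, hB']
          · obtain ⟨h₁, h₂, h₃⟩ := hrel
            refine ⟨h₁, ?_, ?_⟩
            · intro x
              rw [h₂ x]
              constructor <;>
                (rintro ⟨lh, hlh, h⟩; refine ⟨lh, ?_, h⟩;
                 simp only [List.mem_append, List.mem_cons] at hlh ⊢; tauto)
            · intro lh hlh
              apply h₃
              simp only [List.mem_append, List.mem_cons] at hlh ⊢
              tauto
        · simp at hok1
      · rw [Bool.not_eq_true] at h2
        simp only [h2, Bool.false_eq_true, if_false] at hok1
        rcases hv : PySem.Int.ofChars? (PySem.Chars.strip part) with _ | v <;> rw [hv] at hok1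
        · simp at hok1
        simp only [decide_eq_true_eq] at hok1
        have hcond : ¬ (v < 1 ∨ v > n_tracks) := by omega
        have hA : ptiA_step n_tracks (some out) part = some (PySem.Set.add out (v - 1)) := by
          unfold ptiA_step; simp [h1, h2, hv, hcond]
        have hBb : ptiB_bounds part n_tracks = some (v, v) := by
          unfold ptiB_bounds; simp [h2, hv, hcond]
        obtain ⟨o', bs', hA', hB', hrel⟩ := ih hokr
          (PySem.Set.add out (v - 1)) (bs ++ [(v, v)])
          (PySem.Set.nodup_add out _ hnd)
          (by
            intro x
            rw [PySem.Set.mem_add, hmem x]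
            simp only [List.mem_append, List.mem_singleton]
            constructor
            · rintro (⟨lh, hlh, h⟩ | h)
              · exact ⟨lh, Or.inl hlh, h⟩
              · exact ⟨(v, v), Or.inr rfl, by omega⟩
            · rintro ⟨lh, hlh | rfl, h⟩
              · exact Or.inl ⟨lh, hlh, h⟩
              · exact Or.inr (by omega))
          (by
            intro lh hlh
            rcases List.mem_append.mp hlh with h | h
            · exact hbd lh h
            · rw [List.mem_singleton] at h; subst h; refine ⟨by omega, by omega, by omega⟩)
        refine ⟨o', (v, v) :: bs', by simpa [List.foldl_cons, hA] using hA', ?_, ?_⟩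
        · simp only [List.filter_cons, hfil, if_true, ptiB_collect, hBb, hB']
        · obtain ⟨h₁, h₂, h₃⟩ := hrel
          refine ⟨h₁, ?_, ?_⟩
          · intro x
            rw [h₂ x]
            constructor <;>
              (rintro ⟨lh, hlh, h⟩; refine ⟨lh, ?_, h⟩;
               simp only [List.mem_append, List.mem_cons] at hlh ⊢; tauto)
          · intro lh hlh
            apply h₃
            simp only [List.mem_append, List.mem_cons] at hlh ⊢
            tauto

-- the sweep over the sorted bounds emits exactly the union, strictly increasing
lemma pv_sweep (bs : List (Int × Int)) (out0 : List Int) (em0 : Int)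
    (h0 : 0 ≤ em0)
    (hpw : out0.Pairwise (· < ·))
    (hlt : ∀ x ∈ out0, x < em0)
    (hsorted : bs.Pairwise (fun p q => p.1 ≤ q.1))
    (hpos : ∀ lh ∈ bs, 1 ≤ lh.1 ∧ lh.1 ≤ lh.2)
    (hcov : ∀ lh ∈ bs, ∀ x : Int, lh.1 - 1 ≤ x → x < em0 → x ∈ out0) :
    (bs.foldl ptiB_sweep (out0, em0)).1.Pairwise (· < ·) ∧
    (∀ x : Int, x ∈ (bs.foldl ptiB_sweep (out0, em0)).1 ↔
      x ∈ out0 ∨ ∃ lh ∈ bs, lh.1 ≤ x + 1 ∧ x + 1 ≤ lh.2) := by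
  induction bs generalizing out0 em0 with
  | nil =>
    refine ⟨hpw, fun x => ?_⟩
    simp
  | cons lh rest ih =>
    obtain ⟨hlh1, hlh2⟩ := hpos lh (List.mem_cons_self ..)
    have hrest_lo : ∀ q ∈ rest, lh.1 ≤ q.1 := (List.pairwise_cons.mp hsorted).1
    have hsorted' : rest.Pairwise (fun p q => p.1 ≤ q.1) := (List.pairwise_cons.mp hsorted).2
    have hpos' : ∀ q ∈ rest, 1 ≤ q.1 ∧ q.1 ≤ q.2 :=
      fun q hq => hpos q (List.mem_cons_of_mem _ hq)
    have hcov_lh : ∀ x : Int, lh.1 - 1 ≤ x → x < em0 → x ∈ out0 :=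
      hcov lh (List.mem_cons_self ..)
    rw [List.foldl_cons]
    by_cases hgt : lh.1 - 1 > em0
    · -- start = lo - 1; since lo ≤ hi the emit branch is taken
      have hstep : ptiB_sweep (out0, em0) lh =
          (out0 ++ PySem.List.pyRange (lh.1 - 1) lh.2, lh.2) := by
        simp [ptiB_sweep, hgt, (by omega : lh.2 > lh.1 - 1)]
      rw [hstep]
      have hpw' : (out0 ++ PySem.List.pyRange (lh.1 - 1) lh.2).Pairwise (· < ·) := by
        rw [List.pairwise_append]
        refine ⟨hpw, pv_pyRange_pairwise _ _, fun x hx y hy => ?_⟩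
        rw [PySem.List.mem_pyRange_one] at hy
        have := hlt x hx
        omega
      have hlt' : ∀ x ∈ out0 ++ PySem.List.pyRange (lh.1 - 1) lh.2, x < lh.2 := by
        intro x hx
        rcases List.mem_append.mp hx with hx | hx
        · have := hlt x hx; omega
        · exact (PySem.List.mem_pyRange_one.mp hx).2
      have hcov' : ∀ q ∈ rest, ∀ x : Int, q.1 - 1 ≤ x → x < lh.2 →
          x ∈ out0 ++ PySem.List.pyRange (lh.1 - 1) lh.2 := by
        intro q hq x hqx hx2
        have hloq := hrest_lo q hq
        refine List.mem_append.mpr (Or.inr ?_)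
        rw [PySem.List.mem_pyRange_one]
        omega
      obtain ⟨ihp, ihm⟩ := ih (out0 ++ PySem.List.pyRange (lh.1 - 1) lh.2) lh.2 (by omega)
        hpw' hlt' hsorted' hpos' hcov'
      refine ⟨ihp, fun x => ?_⟩
      rw [ihm x]
      simp only [List.mem_append, PySem.List.mem_pyRange_one, List.mem_cons]
      constructor
      · rintro ((hx | hx) | ⟨q, hq, h⟩)
        · exact Or.inl hx
        · exact Or.inr ⟨lh, Or.inl rfl, by omega⟩
        · exact Or.inr ⟨q, Or.inr hq, h⟩
      · rintro (hx | ⟨q, rfl | hq, h⟩)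
        · exact Or.inl (Or.inl hx)
        · exact Or.inl (Or.inr (by omega))
        · exact Or.inr ⟨q, hq, h⟩
    · -- start = emitted
      by_cases hb : lh.2 > em0
      · have hstep : ptiB_sweep (out0, em0) lh =
            (out0 ++ PySem.List.pyRange em0 lh.2, lh.2) := by
          simp [ptiB_sweep, hgt, hb]
        rw [hstep]
        have hpw' : (out0 ++ PySem.List.pyRange em0 lh.2).Pairwise (· < ·) := by
          rw [List.pairwise_append]
          refine ⟨hpw, pv_pyRange_pairwise _ _, fun x hx y hy => ?_⟩
          rw [PySem.List.mem_pyRange_one] at hy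
          have := hlt x hx
          omega
        have hlt' : ∀ x ∈ out0 ++ PySem.List.pyRange em0 lh.2, x < lh.2 := by
          intro x hx
          rcases List.mem_append.mp hx with hx | hx
          · have := hlt x hx; omega
          · exact (PySem.List.mem_pyRange_one.mp hx).2
        have hcov' : ∀ q ∈ rest, ∀ x : Int, q.1 - 1 ≤ x → x < lh.2 →
            x ∈ out0 ++ PySem.List.pyRange em0 lh.2 := by
          intro q hq x hqx hx2
          have hloq := hrest_lo q hq
          rcases (by omega : x < em0 ∨ em0 ≤ x) with hxe | hxe
          · exact List.mem_append.mpr (Or.inl (hcov_lh x (by omega) hxe))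
          · exact List.mem_append.mpr (Or.inr (PySem.List.mem_pyRange_one.mpr ⟨hxe, hx2⟩))
        obtain ⟨ihp, ihm⟩ := ih (out0 ++ PySem.List.pyRange em0 lh.2) lh.2 (by omega)
          hpw' hlt' hsorted' hpos' hcov'
        refine ⟨ihp, fun x => ?_⟩
        rw [ihm x]
        simp only [List.mem_append, PySem.List.mem_pyRange_one, List.mem_cons]
        constructor
        · rintro ((hx | hx) | ⟨q, hq, h⟩)
          · exact Or.inl hx
          · exact Or.inr ⟨lh, Or.inl rfl, by omega⟩
          · exact Or.inr ⟨q, Or.inr hq, h⟩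
        · rintro (hx | ⟨q, rfl | hq, h⟩)
          · exact Or.inl (Or.inl hx)
          · rcases (by omega : x < em0 ∨ em0 ≤ x) with hxe | hxe
            · exact Or.inl (Or.inl (hcov_lh x (by omega) hxe))
            · exact Or.inl (Or.inr (by omega))
          · exact Or.inr ⟨q, hq, h⟩
      · have hstep : ptiB_sweep (out0, em0) lh = (out0, em0) := by
          simp [ptiB_sweep, hgt, hb]
        rw [hstep]
        obtain ⟨ihp, ihm⟩ := ih out0 em0 h0 hpw hlt hsorted' hpos'
          (fun q hq => hcov q (List.mem_cons_of_mem _ hq))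
        refine ⟨ihp, fun x => ?_⟩
        rw [ihm x]
        simp only [List.mem_cons]
        constructor
        · rintro (hx | ⟨q, hq, h⟩)
          · exact Or.inl hx
          · exact Or.inr ⟨q, Or.inr hq, h⟩
        · rintro (hx | ⟨q, rfl | hq, h⟩)
          · exact Or.inl hx
          · exact Or.inl (hcov_lh x (by omega) (by omega))
          · exact Or.inr ⟨q, hq, h⟩

-- emission: sorted(out) is exactly B's sweep over the sorted bounds
lemma pv_emit (out : PySem.Set Int) (bs : List (Int × Int)) (n_tracks : Int)
    (hrel : pvRel out bs n_tracks) :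
    PySem.List.sorted out (fun x => x) =
      ((PySem.List.sorted bs (fun lh => lh.1)).foldl ptiB_sweep
        (([] : List Int), (0 : Int))).1 := by
  obtain ⟨hnd, hmem, hbd⟩ := hrel
  have hsorted := PySem.List.sorted_pairwise bs (fun lh => lh.1)
  have hpos' : ∀ lh ∈ PySem.List.sorted bs (fun lh => lh.1), 1 ≤ lh.1 ∧ lh.1 ≤ lh.2 := by
    intro lh hlh
    have := hbd lh ((PySem.List.mem_sorted ..).mp hlh)
    exact ⟨this.1, this.2.1⟩
  obtain ⟨hpw, hm⟩ := pv_sweep (PySem.List.sorted bs (fun lh => lh.1)) [] 0 le_rfl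
    List.Pairwise.nil (by simp) hsorted hpos'
    (by intro q hq x h1 h2; have := hpos' q hq; omega)
  apply PySem.List.sorted_eq_of_perm_of_pairwise_lt
  · have hnd2 : ((PySem.List.sorted bs (fun lh => lh.1)).foldl ptiB_sweep
        (([] : List Int), (0 : Int))).1.Nodup := List.Pairwise.imp (fun h => ne_of_lt h) hpw
    rw [List.perm_ext_iff_of_nodup hnd2 hnd]
    intro x
    rw [hm x, hmem x]
    simp only [List.not_mem_nil, false_or]
    constructor
    · rintro ⟨q, hq, h⟩
      exact ⟨q, (PySem.List.mem_sorted ..).mp hq, h⟩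
    · rintro ⟨q, hq, h⟩
      exact ⟨q, (PySem.List.mem_sorted ..).mpr hq, h⟩
  · exact hpw

-- ===== VERDICT (by name: the statement is the Claim_ definition above) =====
theorem parse_track_indices_spec : Claim_equal_parse_track_indices := by
  intro spec n_tracks _ hpre
  unfold Spec_parse_track_indices parse_track_indices parse_track_indices_alt
  by_cases hs : spec = ""
  · simp [hs]
  · simp only [hs, if_false]
    rcases hpre with h | hok
    · exact absurd h hs
    · obtain ⟨out, bs', hA, hB, hrel⟩ := pv_run n_tracks _ hok PySem.Set.empty []
        (by simp [PySem.Set.empty]) (by simp [PySem.Set.empty]) (by simp)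
      rw [hA, hB]
      simpa using pv_emit out bs' n_tracks hrel
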